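-- pv_equiv track=rewrite | github.com/mujtabaasifps/banino-schedule-optimizer | schedule_demand.py | _all_transition_headers
-- ===== SOURCE A (Python) =====
-- from typing import Dict, List, Tuple, Optional, Any, Iterable
--
-- def _all_transition_headers(order_candidates: List[List[int]], sku_order: List[str]) -> List[str]:
--     pairs = set()
--     for order in order_candidates:
--         for i in range(len(order) - 1):
--             a = sku_order[order[i]]
--             b = sku_order[order[i+1]]
--             pairs.add((a, b))
--     idx = {sku: i for i, sku in enumerate(sku_order)}
--     pairs_sorted = sorted(list(pairs), key=lambda ab: (idx[ab[0]], idx[ab[1]]))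
--     return [f'after_{a}_to_{b}_transition_h' for a, b in pairs_sorted]
-- ===== SOURCE B (Python) =====
-- def _all_transition_headers(order_candidates, sku_order):
--     # Index-keyed grid instead of set + comparison sort: store each consecutive
--     # pair under its (idx[a], idx[b]) key, then emit keys by an ordered n x n
--     # grid sweep -- no sorted() call.
--     idx = {sku: i for i, sku in enumerate(sku_order)}
--     grid = {}
--     for order in order_candidates:
--         for i in range(len(order) - 1):
--             a = sku_order[order[i]]
--             b = sku_order[order[i+1]]
--             grid[(idx[a], idx[b])] = (a, b)
--     n = len(sku_order)
--     out = []
--     for ka in range(n):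
--         for kb in range(n):
--             if (ka, kb) in grid:
--                 a, b = grid[(ka, kb)]
--                 out.append(f'after_{a}_to_{b}_transition_h')
--     return out
-- ===== Notes on version B (the rewrite author's own statement) =====
-- stated objective: alternative
-- what changed: B drops the set and the comparison sort: during the scan it stores each consecutive pair in a dict keyed by (idx[a], idx[b]), then emits the headers by an ordered n x n grid sweep over those index keys, so the output order comes from range enumeration instead of sorted().
import Mathlib
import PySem

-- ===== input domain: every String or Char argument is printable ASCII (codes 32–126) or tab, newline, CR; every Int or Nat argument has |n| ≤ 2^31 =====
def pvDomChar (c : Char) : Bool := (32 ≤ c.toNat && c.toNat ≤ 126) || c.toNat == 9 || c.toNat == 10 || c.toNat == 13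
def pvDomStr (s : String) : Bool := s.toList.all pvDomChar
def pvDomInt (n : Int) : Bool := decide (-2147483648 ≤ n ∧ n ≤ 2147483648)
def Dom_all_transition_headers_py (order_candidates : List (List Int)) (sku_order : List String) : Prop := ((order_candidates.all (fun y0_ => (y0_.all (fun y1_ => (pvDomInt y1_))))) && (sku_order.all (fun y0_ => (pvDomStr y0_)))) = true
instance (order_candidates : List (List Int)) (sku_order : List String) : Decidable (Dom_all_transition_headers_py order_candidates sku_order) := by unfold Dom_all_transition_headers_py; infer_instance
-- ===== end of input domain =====

-- B replaces A's set + comparison sort by a dict keyed by (idx[a], idx[b]) filled during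
-- the scan and an ordered n×n grid sweep emitting headers in index order (no sorting);
-- objective: alternative (same result, different algorithm for the ordering stage).

-- shared header formatter (the f-string both Pythons contain verbatim)
def pvHeader (ab : String × String) : String :=
  "after_" ++ ab.1 ++ "_to_" ++ ab.2 ++ "_transition_h"

-- idx = {sku: i for i, sku in enumerate(sku_order)}  (both Pythons contain this line verbatim)
def pvIdx (sku_order : List String) : PySem.Dict String Int :=
  (PySem.List.enumerate sku_order 0).foldl (fun d p => d.insert p.2 p.1) PySem.Dict.empty

-- ===== PORT A =====
def all_transition_headers_py (order_candidates : List (List Int)) (sku_order : List String) : List String :=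
  let pairs : PySem.Set (String × String) :=
    order_candidates.foldl (fun pairs order =>
      (PySem.List.pyRange 0 ((order.length : Int) - 1) 1).foldl (fun pairs i =>
        let a := PySem.List.pyGetD sku_order (PySem.List.pyGetD order i 0) ""
        let b := PySem.List.pyGetD sku_order (PySem.List.pyGetD order (i + 1) 0) ""
        PySem.Set.add pairs (a, b)) pairs) PySem.Set.empty
  let idx := pvIdx sku_order
  let pairs_sorted := PySem.List.sorted2 pairs (fun ab => idx.getD ab.1 0) (fun ab => idx.getD ab.2 0)
  pairs_sorted.map pvHeader

-- ===== PORT B =====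
def all_transition_headers_py_alt (order_candidates : List (List Int)) (sku_order : List String) : List String :=
  let idx := pvIdx sku_order
  let grid : PySem.Dict (Int × Int) (String × String) :=
    order_candidates.foldl (fun grid order =>
      (PySem.List.pyRange 0 ((order.length : Int) - 1) 1).foldl (fun grid i =>
        let a := PySem.List.pyGetD sku_order (PySem.List.pyGetD order i 0) ""
        let b := PySem.List.pyGetD sku_order (PySem.List.pyGetD order (i + 1) 0) ""
        grid.insert (idx.getD a 0, idx.getD b 0) (a, b)) grid) PySem.Dict.empty
  let n : Int := sku_order.length
  (PySem.List.pyRange 0 n 1).foldl (fun out ka =>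
    (PySem.List.pyRange 0 n 1).foldl (fun out kb =>
      if grid.contains (ka, kb) then out ++ [pvHeader (grid.getD (ka, kb) ("", ""))] else out) out) []

-- ===== PRECONDITION & SPEC =====
-- Pre_ excludes exactly the inputs where A raises IndexError: some order with ≥ 2 stops
-- contains an index outside -len(sku_order)..len(sku_order)-1 (B raises there too).
def Pre_all_transition_headers_py (order_candidates : List (List Int)) (sku_order : List String) : Prop :=
  ∀ o ∈ order_candidates, 2 ≤ o.length → ∀ x ∈ o, PySem.Raise.InRange sku_order.length x
instance (order_candidates : List (List Int)) (sku_order : List String) : Decidable (Pre_all_transition_headers_py order_candidates sku_order) := by unfold Pre_all_transition_headers_py; infer_instance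
def pvWitness_all_transition_headers_py : List (List Int) × List String :=
  ([[0, 1], [1, 0, 1]], ["alpha", "beta"])
def Spec_all_transition_headers_py (order_candidates : List (List Int)) (sku_order : List String) (out : List String) : Prop := out = all_transition_headers_py_alt order_candidates sku_order
instance (order_candidates : List (List Int)) (sku_order : List String) (out : List String) : Decidable (Spec_all_transition_headers_py order_candidates sku_order out) := by unfold Spec_all_transition_headers_py; infer_instance

-- ===== CLAIM (what is proved, stated in full; the proofs are below) =====
def Claim_equal_all_transition_headers_py : Prop := ∀ (order_candidates : List (List Int)) (sku_order : List String), Dom_all_transition_headers_py order_candidates sku_order → Pre_all_transition_headers_py order_candidates sku_order → Spec_all_transition_headers_py order_candidates sku_order (all_transition_headers_py order_candidates sku_order)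

-- ===== LEMMAS AND PROOFS =====

-- the sort key of a pair, as the (idx a, idx b) tuple
def pvKey (sku_order : List String) (p : String × String) : Int × Int :=
  ((pvIdx sku_order).getD p.1 0, (pvIdx sku_order).getD p.2 0)

-- the consecutive pairs one order contributes, in scan order
def pvPairsOf (sku_order : List String) (order : List Int) : List (String × String) :=
  (PySem.List.pyRange 0 ((order.length : Int) - 1) 1).map (fun i =>
    (PySem.List.pyGetD sku_order (PySem.List.pyGetD order i 0) "",
     PySem.List.pyGetD sku_order (PySem.List.pyGetD order (i + 1) 0) ""))

theorem pvIdx_append (xs : List String) (x : String) :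
    pvIdx (xs ++ [x]) = (pvIdx xs).insert x (xs.length : Int) := by
  simp [pvIdx, PySem.List.enumerate_append, List.foldl_append, PySem.List.enumerate_cons,
    PySem.List.enumerate_nil]


theorem pvIdx_spec (sku_order : List String) (a : String) (ha : a ∈ sku_order) :
    ∃ k : Nat, ∃ hk : k < sku_order.length,
      (pvIdx sku_order).getD a 0 = (k : Int) ∧ sku_order[k] = a := by
  induction sku_order using List.reverseRecOn with
  | nil => simp at ha
  | append_singleton xs x ih =>
    rw [pvIdx_append]
    by_cases hax : a = x
    · subst hax
      exact ⟨xs.length, by simp, by rw [PySem.Dict.getD_insert_self], by simp⟩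
    · simp only [List.mem_append, List.mem_singleton] at ha
      rcases ha with ha | ha
      · obtain ⟨k, hk, hv, he⟩ := ih ha
        refine ⟨k, by simp; omega, ?_, ?_⟩
        · rw [PySem.Dict.getD_insert_of_ne _ _ _ hax]; exact hv
        · rw [List.getElem_append_left hk]; exact he
      · exact absurd ha hax


theorem pvIdx_range (sku_order : List String) (a : String) (ha : a ∈ sku_order) :
    0 ≤ (pvIdx sku_order).getD a 0 ∧ (pvIdx sku_order).getD a 0 < sku_order.length := by
  obtain ⟨k, hk, hv, _⟩ := pvIdx_spec sku_order a ha
  rw [hv]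
  omega


theorem pvIdx_inj (sku_order : List String) (a b : String) (ha : a ∈ sku_order) (hb : b ∈ sku_order)
    (h : (pvIdx sku_order).getD a 0 = (pvIdx sku_order).getD b 0) : a = b := by
  obtain ⟨k, hk, hv, he⟩ := pvIdx_spec sku_order a ha
  obtain ⟨k', hk', hv', he'⟩ := pvIdx_spec sku_order b hb
  rw [hv, hv'] at h
  have : k = k' := by exact_mod_cast h
  subst this
  rw [← he, ← he']


theorem pvKey_inj (sku_order : List String) (p q : String × String)
    (hp : p.1 ∈ sku_order ∧ p.2 ∈ sku_order) (hq : q.1 ∈ sku_order ∧ q.2 ∈ sku_order)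
    (h : pvKey sku_order p = pvKey sku_order q) : p = q := by
  have h1 := congrArg Prod.fst h
  have h2 := congrArg Prod.snd h
  simp only [pvKey] at h1 h2
  exact Prod.ext (pvIdx_inj sku_order p.1 q.1 hp.1 hq.1 h1)
    (pvIdx_inj sku_order p.2 q.2 hp.2 hq.2 h2)


theorem pvSorted2_eq_sorted_lex {α : Type} (xs : List α) (k1 k2 : α → Int) :
    PySem.List.sorted2 xs k1 k2 =
      PySem.List.sorted xs (fun x => (toLex (k1 x, k2 x) : Int ×ₗ Int)) := by
  rw [PySem.List.sorted_eq_foldl_insertBy]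
  show List.foldl (fun acc x => PySem.List.insertBy
      (fun a b => decide (k1 a < k1 b) || !decide (k1 b < k1 a) && decide (k2 a < k2 b)) x acc) [] xs = _
  have hb : (fun a b => decide (k1 a < k1 b) || !decide (k1 b < k1 a) && decide (k2 a < k2 b))
      = (fun a b => decide ((toLex (k1 a, k2 a) : Int ×ₗ Int) < toLex (k1 b, k2 b))) := by
    funext a b
    rcases lt_trichotomy (k1 a) (k1 b) with h | h | h
    · simp [Prod.Lex.toLex_lt_toLex, h]
    · simp [Prod.Lex.toLex_lt_toLex, h]
    · simp [Prod.Lex.toLex_lt_toLex, h]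
      omega
  rw [hb]


theorem pvScan_inv (sku_order : List String) (L : List (String × String))
    (hL : ∀ p ∈ L, p.1 ∈ sku_order ∧ p.2 ∈ sku_order)
    (s : PySem.Set (String × String)) (g : PySem.Dict (Int × Int) (String × String))
    (hs : s.Nodup) (hmem : ∀ p ∈ s, p.1 ∈ sku_order ∧ p.2 ∈ sku_order)
    (hg : g.items = s.map (fun p => (pvKey sku_order p, p))) :
    (L.foldl PySem.Set.add s).Nodup ∧
    (∀ p ∈ L.foldl PySem.Set.add s, p.1 ∈ sku_order ∧ p.2 ∈ sku_order) ∧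
    (L.foldl (fun g p => g.insert (pvKey sku_order p) p) g).items =
      (L.foldl PySem.Set.add s).map (fun p => (pvKey sku_order p, p)) := by
  induction L generalizing s g with
  | nil => exact ⟨hs, hmem, hg⟩
  | cons p L ih =>
    have hp : p.1 ∈ sku_order ∧ p.2 ∈ sku_order := hL p (by simp)
    have hL' : ∀ q ∈ L, q.1 ∈ sku_order ∧ q.2 ∈ sku_order := fun q hq => hL q (by simp [hq])
    simp only [List.foldl_cons]
    by_cases hps : p ∈ s
    · rw [PySem.Set.add_of_mem hps]
      apply ih hL' s _ hs hmem
      -- contains is true; overwrite with the identical entry leaves items unchanged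
      have hcont : g.contains (pvKey sku_order p) = true := by
        rw [PySem.Dict.contains_iff_mem_keys]
        show pvKey sku_order p ∈ PySem.Dict.keys g
        have : g.keys = s.map (fun q => pvKey sku_order q) := by
          show g.items.map Prod.fst = _
          rw [hg, List.map_map]; rfl
        rw [this]
        exact List.mem_map_of_mem hps
      rw [PySem.Dict.items_insert_of_contains _ _ hcont, hg, List.map_map]
      apply List.map_congr_left
      intro q hq
      simp only [Function.comp]
      by_cases hk : pvKey sku_order q = pvKey sku_order p
      · have : q = p := pvKey_inj sku_order q p (hmem q hq) hp hk
        subst this; simp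
      · simp [hk]
    · rw [PySem.Set.add_of_not_mem hps]
      have hcont : g.contains (pvKey sku_order p) = false := by
        by_contra hc
        rw [Bool.not_eq_false, PySem.Dict.contains_iff_mem_keys] at hc
        have hkeys : g.keys = s.map (fun q => pvKey sku_order q) := by
          show g.items.map Prod.fst = _
          rw [hg, List.map_map]; rfl
        rw [hkeys] at hc
        obtain ⟨q, hq, hk⟩ := List.mem_map.mp hc
        exact hps (pvKey_inj sku_order q p (hmem q hq) hp hk ▸ hq)
      apply ih hL' (s ++ [p]) _ ?_ ?_ ?_
      · apply List.Nodup.append hs (List.nodup_singleton p)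
        intro a ha hb
        simp only [List.mem_singleton] at hb
        exact hps (hb ▸ ha)
      · intro q hq
        rcases List.mem_append.mp hq with h | h
        · exact hmem q h
        · simp at h; subst h; exact hp
      · rw [PySem.Dict.items_insert_of_not_contains _ _ hcont, hg, List.map_append]; rfl


theorem pvProduct_pairwise_lex (l₁ l₂ : List Int)
    (h₁ : l₁.Pairwise (· < ·)) (h₂ : l₂.Pairwise (· < ·)) :
    (l₁ ×ˢ l₂).Pairwise (fun k k' => (toLex k : Int ×ₗ Int) < toLex k') := by
  induction l₁ with
  | nil => simp
  | cons a l₁ ih =>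
    rw [List.pairwise_cons] at h₁
    have hstep : (l₁ ×ˢ l₂).Pairwise (fun k k' => (toLex k : Int ×ₗ Int) < toLex k') := ih h₁.2
    show (List.map (Prod.mk a) l₂ ++ l₁ ×ˢ l₂).Pairwise _
    rw [List.pairwise_append]
    refine ⟨?_, hstep, ?_⟩
    · rw [List.pairwise_map]
      exact h₂.imp (fun {x y} h => by
        rw [Prod.Lex.toLex_lt_toLex]; exact Or.inr ⟨rfl, h⟩)
    · intro x hx y hy
      obtain ⟨b, hb, rfl⟩ := List.mem_map.mp hx
      have hy1 : y.1 ∈ l₁ := ((List.mem_product).mp (by exact_mod_cast hy)).1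
      rw [Prod.Lex.toLex_lt_toLex]
      exact Or.inl (h₁.1 _ hy1)


-- the ordering stage: grid sweep over a keyed dict = sorted2 of the pair set
theorem pvStage_eq (sku_order : List String) (s : PySem.Set (String × String))
    (g : PySem.Dict (Int × Int) (String × String))
    (hs : s.Nodup) (hmem : ∀ p ∈ s, p.1 ∈ sku_order ∧ p.2 ∈ sku_order)
    (hg : g.items = s.map (fun p => (pvKey sku_order p, p))) :
    (PySem.List.sorted2 s (fun ab => (pvIdx sku_order).getD ab.1 0)
        (fun ab => (pvIdx sku_order).getD ab.2 0)).map pvHeader =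
    (PySem.List.pyRange 0 (sku_order.length : Int) 1).foldl (fun out ka =>
      (PySem.List.pyRange 0 (sku_order.length : Int) 1).foldl (fun out kb =>
        if g.contains (ka, kb) then out ++ [pvHeader (g.getD (ka, kb) ("", ""))] else out) out) [] := by
  set r := PySem.List.pyRange 0 (sku_order.length : Int) 1 with hr
  set d0 : String × String := ("", "") with hd0
  set sel : List (Int × Int) := (r ×ˢ r).filter (fun k => g.contains k) with hsel
  -- basic dictionary facts
  have hkeys : g.keys = s.map (pvKey sku_order) := by
    show g.items.map Prod.fst = _
    rw [hg, List.map_map]; rfl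
  have hknodup : (s.map (pvKey sku_order)).Nodup := by
    refine List.Nodup.map_on ?_ hs
    intro x hx y hy hxy
    exact pvKey_inj sku_order x y (hmem x hx) (hmem y hy) hxy
  have hgetD : ∀ p ∈ s, g.getD (pvKey sku_order p) d0 = p := by
    intro p hp
    apply PySem.Dict.getD_of_mem_items
    · rw [hg]; exact List.mem_map_of_mem hp
    · rw [hkeys]; exact hknodup
  have hcont : ∀ k, g.contains k = true ↔ k ∈ s.map (pvKey sku_order) := by
    intro k; rw [PySem.Dict.contains_iff_mem_keys, hkeys]
  have hrange : ∀ p ∈ s, pvKey sku_order p ∈ r ×ˢ r := by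
    intro p hp
    have h1 := pvIdx_range sku_order p.1 (hmem p hp).1
    have h2 := pvIdx_range sku_order p.2 (hmem p hp).2
    show ((pvIdx sku_order).getD p.1 0, (pvIdx sku_order).getD p.2 0) ∈ _
    rw [List.mem_product, hr, PySem.List.mem_pyRange_one, PySem.List.mem_pyRange_one]
    omega
  -- the RHS is the grid selection, mapped through the header
  have hRHS : (r.foldl (fun out ka =>
      r.foldl (fun out kb =>
        if g.contains (ka, kb) then out ++ [pvHeader (g.getD (ka, kb) d0)] else out) out) [])
      = sel.map (fun k => pvHeader (g.getD k d0)) := by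
    have hinner : ∀ (ka : Int) (out : List String),
        r.foldl (fun out kb =>
          if g.contains (ka, kb) then out ++ [pvHeader (g.getD (ka, kb) d0)] else out) out
        = out ++ ((r.filter (fun kb => g.contains (ka, kb))).map
            (fun kb => pvHeader (g.getD (ka, kb) d0))) := by
      intro ka out
      exact PySem.List.foldl_append_if (fun kb => g.contains (ka, kb)) (fun kb => pvHeader (g.getD (ka, kb) d0)) r out
    calc r.foldl (fun out ka =>
        r.foldl (fun out kb =>
          if g.contains (ka, kb) then out ++ [pvHeader (g.getD (ka, kb) d0)] else out) out) []
        = r.foldl (fun out ka => out ++ ((r.filter (fun kb => g.contains (ka, kb))).map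
            (fun kb => pvHeader (g.getD (ka, kb) d0)))) [] := by
          apply PySem.List.foldl_congr_mem
          intro out ka _
          exact hinner ka out
      _ = r.flatMap (fun ka => ((r.filter (fun kb => g.contains (ka, kb))).map
            (fun kb => pvHeader (g.getD (ka, kb) d0)))) := by
          rw [PySem.List.foldl_append_eq_flatMap]; rfl
      _ = sel.map (fun k => pvHeader (g.getD k d0)) := by
          rw [hsel]
          show _ = ((r.flatMap (fun ka => r.map (Prod.mk ka))).filter
            (fun k => g.contains k)).map (fun k => pvHeader (g.getD k d0))
          rw [List.filter_flatMap, List.map_flatMap]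
          congr 1
          funext ka
          rw [List.filter_map, List.map_map]
          rfl
  have hselNodup : sel.Nodup :=
    ((PySem.List.nodup_pyRange_one 0 (sku_order.length : Int)).product
      (PySem.List.nodup_pyRange_one 0 (sku_order.length : Int))).filter _
  have hselPerm : sel.Perm (s.map (pvKey sku_order)) := by
    rw [List.perm_ext_iff_of_nodup hselNodup hknodup]
    intro k
    constructor
    · intro hk
      exact (hcont k).mp (List.mem_filter.mp hk).2
    · intro hk
      apply List.mem_filter.mpr
      refine ⟨?_, (hcont k).mpr hk⟩
      obtain ⟨p, hp, rfl⟩ := List.mem_map.mp hk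
      exact hrange p hp
  have hysPerm : (sel.map (fun k => g.getD k d0)).Perm s := by
    have h1 := hselPerm.map (fun k => g.getD k d0)
    have h2 : (s.map (pvKey sku_order)).map (fun k => g.getD k d0) = s := by
      rw [List.map_map]
      have hc : ∀ p ∈ s, ((fun k => g.getD k d0) ∘ pvKey sku_order) p = id p := fun p hp => hgetD p hp
      rw [List.map_congr_left hc, List.map_id]
    rwa [h2] at h1
  have hselPair : sel.Pairwise (fun k k' => (toLex k : Int ×ₗ Int) < toLex k') :=
    (pvProduct_pairwise_lex r r (PySem.List.pairwise_lt_pyRange_one 0 _)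
      (PySem.List.pairwise_lt_pyRange_one 0 _)).filter _
  have hkeyofsel : ∀ k ∈ sel, pvKey sku_order (g.getD k d0) = k := by
    intro k hk
    have hkm : k ∈ s.map (pvKey sku_order) := (hcont k).mp (List.mem_filter.mp hk).2
    obtain ⟨p, hp, rfl⟩ := List.mem_map.mp hkm
    rw [hgetD p hp]
  have hysPair : (sel.map (fun k => g.getD k d0)).Pairwise
      (fun p q => (toLex (pvKey sku_order p) : Int ×ₗ Int) < toLex (pvKey sku_order q)) := by
    rw [List.pairwise_map]
    refine List.Pairwise.imp_of_mem ?_ hselPair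
    intro a b ha hb hab
    rwa [hkeyofsel a ha, hkeyofsel b hb]
  have hsorted : PySem.List.sorted s (fun p => (toLex (pvKey sku_order p) : Int ×ₗ Int))
      = sel.map (fun k => g.getD k d0) :=
    PySem.List.sorted_eq_of_perm_of_pairwise_lt _ _ _ hysPerm hysPair
  rw [pvSorted2_eq_sorted_lex, hRHS]
  show (PySem.List.sorted s (fun p => (toLex (pvKey sku_order p) : Int ×ₗ Int))).map pvHeader = _
  rw [hsorted, List.map_map]
  rfl


-- ===== VERDICT (by name: the statement is the Claim_ definition above) =====
theorem all_transition_headers_py_spec : Claim_equal_all_transition_headers_py := by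
  intro oc sku _hdom hpre
  unfold Spec_all_transition_headers_py
  show all_transition_headers_py oc sku = all_transition_headers_py_alt oc sku
  have hL : ∀ p ∈ oc.flatMap (pvPairsOf sku), p.1 ∈ sku ∧ p.2 ∈ sku := by
    intro p hp
    obtain ⟨o, ho, hpo⟩ := List.mem_flatMap.mp hp
    simp only [pvPairsOf] at hpo
    obtain ⟨i, hi, rfl⟩ := List.mem_map.mp hpo
    rw [PySem.List.mem_pyRange_one] at hi
    have hlen : 2 ≤ o.length := by omega
    have hx : PySem.List.pyGetD o i 0 ∈ o :=
      PySem.List.pyGetD_mem o 0 ⟨by omega, by omega⟩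
    have hy : PySem.List.pyGetD o (i + 1) 0 ∈ o :=
      PySem.List.pyGetD_mem o 0 ⟨by omega, by omega⟩
    exact ⟨PySem.List.pyGetD_mem sku "" (hpre o ho hlen _ hx),
           PySem.List.pyGetD_mem sku "" (hpre o ho hlen _ hy)⟩
  obtain ⟨hs, hmem, hg⟩ := pvScan_inv sku (oc.flatMap (pvPairsOf sku)) hL
    PySem.Set.empty PySem.Dict.empty List.nodup_nil (by simp [PySem.Set.empty]) rfl
  have hstage := pvStage_eq sku
    ((oc.flatMap (pvPairsOf sku)).foldl PySem.Set.add PySem.Set.empty)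
    ((oc.flatMap (pvPairsOf sku)).foldl (fun g p => g.insert (pvKey sku p) p) PySem.Dict.empty)
    hs hmem hg
  rw [List.foldl_flatMap, List.foldl_flatMap] at hstage
  simp only [pvPairsOf, List.foldl_map, pvKey] at hstage
  simp only [all_transition_headers_py, all_transition_headers_py_alt]
  exact hstage
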